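-- pv_equiv track=rewrite | github.com/WaicongTam/OntoMedRec | downstream/util.py | find_similae_set_by_ja
-- ===== SOURCE A (Python) =====
-- def find_similae_set_by_ja(sym_train):
--     similar_sets = [[] for _ in range(len(sym_train))]
--     for i in range(len(sym_train)):
--         for j in range(len(sym_train[i])):
--             similar_sets[i].append(j)
--
--     for idx, sym_batch in enumerate(sym_train):
--         if len(sym_batch) <= 2 or len(sym_batch[0]) <= 2: continue
--         batch_sets = [set(sym_set) for sym_set in sym_batch]
--         for i in range(len(batch_sets)):
--             max_intersection = 0
--             for j in range(len(batch_sets)):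
--                 if i == j: continue
--                 if len(batch_sets[i] & batch_sets[j]) > max_intersection:
--                     max_intersection = len(batch_sets[i] & batch_sets[j])
--                     similar_sets[idx][i] = j
--
--     return similar_sets
-- ===== SOURCE B (Python) =====
-- def find_similae_set_by_ja(sym_train):
--     result = []
--     for sym_batch in sym_train:
--         n = len(sym_batch)
--         if n <= 2 or len(sym_batch[0]) <= 2:
--             result.append(list(range(n)))
--             continue
--         # ordered dedup of each set
--         ds = [list(dict.fromkeys(s)) for s in sym_batch]
--         # inverted index: element -> indices of the sets containing it
--         index = {}
--         for j, dj in enumerate(ds):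
--             for e in dj:
--                 index.setdefault(e, []).append(j)
--         row = []
--         for i in range(n):
--             # cnt[j] = |set(ds[i]) & set(ds[j])| accumulated via the inverted index
--             cnt = {}
--             for e in ds[i]:
--                 for j in index.get(e, []):
--                     cnt[j] = cnt.get(j, 0) + 1
--             best_val, best_j = 0, i
--             for j in range(n):
--                 c = cnt.get(j, 0)
--                 if j != i and c > best_val:
--                     best_val, best_j = c, j
--             row.append(best_j)
--         result.append(row)
--     return result
-- ===== Notes on version B (the rewrite author's own statement) =====
-- stated objective: faster
-- what changed: Per batch, A intersects every pair of sets (O(n^2) set intersections); B builds an inverted index from element to the sets containing it, accumulates per-set overlap counters from that index, and then picks for each set the first index with maximal positive count, which provably equals A's first-strict-improvement scan over pairwise intersection sizes.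
import Mathlib
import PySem

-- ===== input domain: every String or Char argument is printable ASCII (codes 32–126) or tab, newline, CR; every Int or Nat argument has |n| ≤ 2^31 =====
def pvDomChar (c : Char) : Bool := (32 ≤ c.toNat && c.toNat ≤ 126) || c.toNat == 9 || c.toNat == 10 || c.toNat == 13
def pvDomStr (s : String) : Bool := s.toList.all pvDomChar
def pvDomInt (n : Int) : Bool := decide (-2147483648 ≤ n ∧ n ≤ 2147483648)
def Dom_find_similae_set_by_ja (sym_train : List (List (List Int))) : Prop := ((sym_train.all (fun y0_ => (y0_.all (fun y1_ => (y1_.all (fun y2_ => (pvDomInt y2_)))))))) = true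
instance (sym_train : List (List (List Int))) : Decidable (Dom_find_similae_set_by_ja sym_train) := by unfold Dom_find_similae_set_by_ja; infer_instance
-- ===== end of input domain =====

-- B replaces A's per-batch all-pairs set intersections by an inverted index
-- (element -> containing sets) with accumulated overlap counts; same results.

-- ===== PORT A =====
def find_similae_set_by_ja (sym_train : List (List (List Int))) : List (List Int) :=
  -- first double loop: row i collects j for j in range(len(sym_train[i])); rows are independent
  let similar_sets := sym_train.map (fun b => (PySem.List.pyRange 0 (b.length : Int) 1).foldl (fun acc j => acc ++ [j]) [])
  (PySem.List.enumerate sym_train).foldl (fun ss p =>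
    if p.2.length ≤ 2 then ss
    else if (PySem.List.pyGetD p.2 0 []).length ≤ 2 then ss   -- p.2 nonempty here, so sym_batch[0] cannot raise
    else
      let batch_sets := p.2.map (fun s => PySem.Set.ofList s)
      (PySem.List.pyRange 0 (batch_sets.length : Int) 1).foldl (fun ss2 i =>
        ((PySem.List.pyRange 0 (batch_sets.length : Int) 1).foldl (fun st j =>
          if j = i then st
          else if ((PySem.Set.inter (PySem.List.pyGetD batch_sets i []) (PySem.List.pyGetD batch_sets j [])).length : Int) > st.1 then
            (((PySem.Set.inter (PySem.List.pyGetD batch_sets i []) (PySem.List.pyGetD batch_sets j [])).length : Int),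
              PySem.List.pySetD st.2 p.1 (PySem.List.pySetD (PySem.List.pyGetD st.2 p.1 []) i j))
          else st) ((0 : Int), ss2)).2) ss) similar_sets

-- ===== PORT B =====
def find_similae_set_by_ja_alt (sym_train : List (List (List Int))) : List (List Int) :=
  sym_train.foldl (fun result sym_batch =>
    if sym_batch.length ≤ 2 then result ++ [PySem.List.pyRange 0 (sym_batch.length : Int) 1]
    else if (PySem.List.pyGetD sym_batch 0 []).length ≤ 2 then result ++ [PySem.List.pyRange 0 (sym_batch.length : Int) 1]
    else
      let ds := sym_batch.map (fun s => PySem.List.dedup s)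
      let index := (PySem.List.enumerate ds).foldl (fun d q =>
        q.2.foldl (fun d e => d.modify e [] (fun l => l ++ [q.1])) d) PySem.Dict.empty
      let row := (PySem.List.pyRange 0 (sym_batch.length : Int) 1).foldl (fun row i =>
        let cnt := (PySem.List.pyGetD ds i []).foldl (fun c e =>
          (index.getD e []).foldl (fun c j => c.insert j (c.getD j 0 + 1)) c) PySem.Dict.empty
        row ++ [((PySem.List.pyRange 0 (sym_batch.length : Int) 1).foldl (fun st j =>
          let c := cnt.getD j 0
          if j ≠ i ∧ c > st.1 then (c, j) else st) ((0 : Int), i)).2]) []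
      result ++ [row]) []

-- ===== PRECONDITION & SPEC =====
def Spec_find_similae_set_by_ja (sym_train : List (List (List Int))) (out : List (List Int)) : Prop := out = find_similae_set_by_ja_alt sym_train
instance (sym_train : List (List (List Int))) (out : List (List Int)) : Decidable (Spec_find_similae_set_by_ja sym_train out) := by unfold Spec_find_similae_set_by_ja; infer_instance

-- ===== CLAIM (what is proved, stated in full; the proofs are below) =====
def Claim_equal_find_similae_set_by_ja : Prop := ∀ (sym_train : List (List (List Int))), Dom_find_similae_set_by_ja sym_train → Spec_find_similae_set_by_ja sym_train (find_similae_set_by_ja sym_train)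

-- ===== LEMMAS AND PROOFS =====

-- the common per-batch abstraction (with A's weights: pairwise intersection sizes)
def pvInit (b : List (List Int)) : List Int := PySem.List.pyRange 0 (b.length : Int) 1
def pvBsets (b : List (List Int)) : List (PySem.Set Int) := b.map (fun s => PySem.Set.ofList s)
def pvW (bs : List (PySem.Set Int)) (i j : Int) : Int :=
  ((PySem.Set.inter (PySem.List.pyGetD bs i []) (PySem.List.pyGetD bs j [])).length : Int)
def pvBest (f : Int → Int) (n : Int) (i : Int) : Int × Int :=
  (PySem.List.pyRange 0 n 1).foldl (fun st j => if j ≠ i ∧ f j > st.1 then (f j, j) else st) ((0 : Int), i)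
def pvRow (b : List (List Int)) : List Int :=
  (PySem.List.pyRange 0 (b.length : Int) 1).map (fun i => (pvBest (pvW (pvBsets b) i) (b.length : Int) i).2)
def pvPer (b : List (List Int)) : List Int :=
  if b.length ≤ 2 then pvInit b
  else if (PySem.List.pyGetD b 0 []).length ≤ 2 then pvInit b
  else pvRow b

-- A's inner-scan state abstraction
def pvScan (f : Int → Int) (i : Int) (L : List Int) (m : Int) (o : Option Int) : Int × Option Int :=
  L.foldl (fun st j => if j = i then st else if f j > st.1 then (f j, some j) else st) (m, o)
def pvApply (ss : List (List Int)) (idx i : Int) (o : Option Int) : List (List Int) :=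
  match o with
  | none => ss
  | some j => PySem.List.pySetD ss idx (PySem.List.pySetD (PySem.List.pyGetD ss idx []) i j)

-- relation between A's option-valued scan and B's (value, index) scan
theorem pv_scan_rel (f : Int → Int) (i : Int) (L : List Int) :
    ∀ (m : Int) (o : Option Int) (bj : Int), ((o = none ∧ bj = i) ∨ o = some bj) →
    (pvScan f i L m o).1 = (L.foldl (fun st j => if j ≠ i ∧ f j > st.1 then (f j, j) else st) (m, bj)).1 ∧
    (((pvScan f i L m o).2 = none ∧ (L.foldl (fun st j => if j ≠ i ∧ f j > st.1 then (f j, j) else st) (m, bj)).2 = i) ∨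
      (pvScan f i L m o).2 = some (L.foldl (fun st j => if j ≠ i ∧ f j > st.1 then (f j, j) else st) (m, bj)).2) := by
  induction L with
  | nil =>
      intro m o bj h
      rcases h with ⟨h1, h2⟩ | h1
      · simp [pvScan, h1, h2]
      · simp [pvScan, h1]
  | cons j L ih =>
      intro m o bj h
      simp only [pvScan, List.foldl_cons] at *
      by_cases hj : j = i
      · subst hj
        simp only [if_pos rfl, ne_eq, not_true_eq_false, false_and, if_false]
        exact ih m o bj h
      · by_cases hf : f j > m
        · simp only [if_neg hj, ne_eq]
          rw [if_pos (show f j > (m, o).1 from hf), if_pos ⟨hj, (show f j > (m, bj).1 from hf)⟩]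
          exact ih (f j) (some j) j (Or.inr rfl)
        · simp only [if_neg hj, ne_eq]
          rw [if_neg (show ¬ f j > (m, o).1 from hf), if_neg (by exact fun hc => hf hc.2)]
          exact ih m o bj h

theorem pv_apply_step (ss0 : List (List Int)) (idx : Nat) (hidx : idx < ss0.length) (iN : Nat) (j : Int) :
    ∀ o, PySem.List.pySetD (pvApply ss0 (idx : Int) (iN : Int) o) (idx : Int)
          (PySem.List.pySetD (PySem.List.pyGetD (pvApply ss0 (idx : Int) (iN : Int) o) (idx : Int) []) (iN : Int) j)
        = pvApply ss0 (idx : Int) (iN : Int) (some j) := by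
  intro o
  cases o with
  | none => rfl
  | some j0 =>
      simp only [pvApply]
      rw [PySem.List.pyGetD_pySetD_natCast _ _ _ _ _ hidx]
      simp [PySem.List.pySetD_natCast, List.set_set]

-- A's j-loop, started on a row-patched state, is the option scan applied to the row
theorem pv_jfold (f : Int → Int) (iN : Nat) (idx : Nat) (ss0 : List (List Int)) (hidx : idx < ss0.length)
    (L : List Int) :
    ∀ (m : Int) (o : Option Int),
    L.foldl (fun st j =>
        if j = (iN : Int) then st
        else if f j > st.1 then (f j, PySem.List.pySetD st.2 (idx : Int) (PySem.List.pySetD (PySem.List.pyGetD st.2 (idx : Int) []) (iN : Int) j))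
        else st) (m, pvApply ss0 (idx : Int) (iN : Int) o)
      = ((pvScan f (iN : Int) L m o).1, pvApply ss0 (idx : Int) (iN : Int) (pvScan f (iN : Int) L m o).2) := by
  induction L with
  | nil => intro m o; rfl
  | cons j L ih =>
      intro m o
      simp only [List.foldl_cons, pvScan] at *
      by_cases hj : j = (iN : Int)
      · simp only [if_pos hj]
        exact ih m o
      · by_cases hf : f j > m
        · simp only [if_neg hj]
          rw [if_pos (show f j > (m, pvApply ss0 (idx : Int) (iN : Int) o).1 from hf),
              if_pos (show f j > (m, o).1 from hf)]
          rw [pv_apply_step ss0 idx hidx iN j o]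
          exact ih (f j) (some j)
        · simp only [if_neg hj]
          rw [if_neg (show ¬ f j > (m, pvApply ss0 (idx : Int) (iN : Int) o).1 from hf),
              if_neg (show ¬ f j > (m, o).1 from hf)]
          exact ih m o

theorem pv_set_mid (pre : List (List Int)) (x v : List Int) (t : List (List Int)) :
    (pre ++ x :: t).set pre.length v = pre ++ v :: t := by
  induction pre with
  | nil => rfl
  | cons a pre ih => simpa using ih

theorem pv_set_mid_row (done : List Int) (x v : Int) (t : List Int) :
    (done ++ x :: t).set done.length v = done ++ v :: t := by
  induction done with
  | nil => rfl
  | cons a done ih => simpa using ih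

-- A's i-loop writes row entries one by one: processed prefix `done`, untouched suffix is the identity
theorem pv_ifold (F : Int → Int → Int) (nN : Nat) (idx : Nat) (ssI : List (List Int)) (hidx : idx < ssI.length) :
    ∀ (m k : Nat) (done : List Int), k + m = nN → done.length = k →
    (PySem.List.pyRange (k : Int) (nN : Int) 1).foldl (fun ss2 i =>
        ((PySem.List.pyRange 0 (nN : Int) 1).foldl (fun st j =>
          if j = i then st
          else if F i j > st.1 then (F i j, PySem.List.pySetD st.2 (idx : Int) (PySem.List.pySetD (PySem.List.pyGetD st.2 (idx : Int) []) i j))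
          else st) ((0 : Int), ss2)).2)
      (PySem.List.pySetD ssI (idx : Int) (done ++ PySem.List.pyRange (k : Int) (nN : Int) 1))
    = PySem.List.pySetD ssI (idx : Int) (done ++ (PySem.List.pyRange (k : Int) (nN : Int) 1).map (fun i => (pvBest (F i) (nN : Int) i).2)) := by
  intro m
  induction m with
  | zero =>
      intro k done hk hd
      have hkn : k = nN := by omega
      subst hkn
      rw [PySem.List.pyRange_one_eq_nil (le_refl _)]
      simp
  | succ m ih =>
      intro k done hk hd
      subst hd
      have hklt : ((done.length : Nat) : Int) < (nN : Int) := by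
        exact_mod_cast (show done.length < nN by omega)
      rw [PySem.List.pyRange_one_cons hklt]
      simp only [List.foldl_cons, List.map_cons]
      have hidx2 : idx < (PySem.List.pySetD ssI (idx : Int) (done ++ (done.length : Int) :: PySem.List.pyRange ((done.length : Int) + 1) (nN : Int) 1)).length := by
        rw [PySem.List.pySetD_natCast]
        simpa using hidx
      have hj := pv_jfold (F (done.length : Int)) done.length idx
        (PySem.List.pySetD ssI (idx : Int) (done ++ (done.length : Int) :: PySem.List.pyRange ((done.length : Int) + 1) (nN : Int) 1)) hidx2
        (PySem.List.pyRange 0 (nN : Int) 1) 0 none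
      rw [show pvApply (PySem.List.pySetD ssI (idx : Int) (done ++ (done.length : Int) :: PySem.List.pyRange ((done.length : Int) + 1) (nN : Int) 1)) (idx : Int) ((done.length : Nat) : Int) none
            = PySem.List.pySetD ssI (idx : Int) (done ++ (done.length : Int) :: PySem.List.pyRange ((done.length : Int) + 1) (nN : Int) 1) from rfl] at hj
      have hj2 := congrArg Prod.snd hj
      dsimp only at hj2
      rw [hj2]
      have hbest := pv_scan_rel (F (done.length : Int)) ((done.length : Nat) : Int)
        (PySem.List.pyRange 0 (nN : Int) 1) 0 none ((done.length : Nat) : Int) (Or.inl ⟨rfl, rfl⟩)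
      have hmid : pvApply (PySem.List.pySetD ssI (idx : Int) (done ++ (done.length : Int) :: PySem.List.pyRange ((done.length : Int) + 1) (nN : Int) 1)) (idx : Int) ((done.length : Nat) : Int)
            (pvScan (F (done.length : Int)) ((done.length : Nat) : Int) (PySem.List.pyRange 0 (nN : Int) 1) 0 none).2
          = PySem.List.pySetD ssI (idx : Int) ((done ++ [(pvBest (F (done.length : Int)) (nN : Int) (done.length : Int)).2]) ++ PySem.List.pyRange ((done.length : Int) + 1) (nN : Int) 1) := by
        rcases hbest.2 with ⟨hnone, hbk⟩ | hsome
        · rw [hnone]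
          have hbb : (pvBest (F (done.length : Int)) (nN : Int) (done.length : Int)).2 = (done.length : Int) := by
            simpa [pvBest] using hbk
          simp [pvApply, hbb]
        · rw [hsome]
          simp only [pvApply]
          rw [PySem.List.pyGetD_pySetD_natCast _ _ _ _ _ hidx]
          simp only [eq_self_iff_true, if_true, PySem.List.pySetD_natCast, List.set_set]
          rw [pv_set_mid_row]
          simp [PySem.List.pySetD_natCast, pvBest]
      rw [hmid]
      rw [show ((done.length : Int) + 1) = (((done ++ [(pvBest (F (done.length : Int)) (nN : Int) (done.length : Int)).2]).length : Nat) : Int) by simp]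
      rw [ih (done ++ [(pvBest (F (done.length : Int)) (nN : Int) (done.length : Int)).2]).length
            (done ++ [(pvBest (F (done.length : Int)) (nN : Int) (done.length : Int)).2]) (by simp; omega) rfl]
      simp

-- A's outer loop body, named
def pvStepA : List (List Int) → Int × List (List Int) → List (List Int) := fun ss p =>
  if p.2.length ≤ 2 then ss
  else if (PySem.List.pyGetD p.2 0 []).length ≤ 2 then ss
  else
    let batch_sets := p.2.map (fun s => PySem.Set.ofList s)
    (PySem.List.pyRange 0 (batch_sets.length : Int) 1).foldl (fun ss2 i =>
      ((PySem.List.pyRange 0 (batch_sets.length : Int) 1).foldl (fun st j =>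
        if j = i then st
        else if ((PySem.Set.inter (PySem.List.pyGetD batch_sets i []) (PySem.List.pyGetD batch_sets j [])).length : Int) > st.1 then
          (((PySem.Set.inter (PySem.List.pyGetD batch_sets i []) (PySem.List.pyGetD batch_sets j [])).length : Int),
            PySem.List.pySetD st.2 p.1 (PySem.List.pySetD (PySem.List.pyGetD st.2 p.1 []) i j))
        else st) ((0 : Int), ss2)).2) ss

theorem pvA_unfold (st : List (List (List Int))) :
    find_similae_set_by_ja st = (PySem.List.enumerate st).foldl pvStepA (st.map pvInit) := by
  unfold find_similae_set_by_ja pvStepA pvInit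
  simp only [PySem.List.foldl_append_singleton_eq_self, List.nil_append]

theorem pv_stepA_eq (pre : List (List Int)) (b : List (List Int)) (t : List (List Int)) :
    pvStepA (pre ++ pvInit b :: t) ((pre.length : Int), b) = pre ++ pvPer b :: t := by
  unfold pvStepA pvPer
  by_cases h1 : b.length ≤ 2
  · simp [h1]
  · by_cases h2 : (PySem.List.pyGetD b 0 []).length ≤ 2
    · simp [h1, h2]
    · simp only [h1, h2, if_false]
      have hidx : pre.length < (pre ++ pvInit b :: t).length := by simp
      have HI := pv_ifold (fun i j => pvW (pvBsets b) i j) b.length pre.length (pre ++ pvInit b :: t) hidx b.length 0 [] (by omega) rfl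
      simp only [pvW, pvBsets, Nat.cast_zero, List.nil_append] at HI
      have hss : PySem.List.pySetD (pre ++ pvInit b :: t) ((pre.length : Nat) : Int) (PySem.List.pyRange 0 (b.length : Int) 1) = pre ++ pvInit b :: t := by
        rw [PySem.List.pySetD_natCast]
        exact pv_set_mid pre (pvInit b) (pvInit b) t
      rw [hss] at HI
      simp only [List.length_map]
      rw [HI]
      rw [PySem.List.pySetD_natCast, pv_set_mid]
      rfl

theorem pv_global : ∀ (batches : List (List (List Int))) (pre : List (List Int)),
    (PySem.List.enumerate batches (pre.length : Int)).foldl pvStepA (pre ++ batches.map pvInit) = pre ++ batches.map pvPer := by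
  intro batches
  induction batches with
  | nil => intro pre; simp [PySem.List.enumerate_nil]
  | cons b rest ih =>
      intro pre
      rw [PySem.List.enumerate_cons, List.foldl_cons, List.map_cons, pv_stepA_eq pre b (rest.map pvInit)]
      have h1 : pre ++ pvPer b :: rest.map pvInit = (pre ++ [pvPer b]) ++ rest.map pvInit := by simp
      have h2 : (pre.length : Int) + 1 = (((pre ++ [pvPer b]).length : Nat) : Int) := by simp
      rw [h1, h2, ih (pre ++ [pvPer b])]
      simp

theorem find_similae_set_by_ja_A_eq (st : List (List (List Int))) :
    find_similae_set_by_ja st = st.map pvPer := by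
  rw [pvA_unfold]
  have h := pv_global st []
  simpa using h

-- ===== the B side: counting via the inverted index equals intersection sizes =====

theorem pv_modify_row (jv : Int) : ∀ (xs : List Int) (d0 : PySem.Dict Int (List Int)) (e : Int),
    (xs.foldl (fun d x => d.modify x [] (fun l => l ++ [jv])) d0).getD e []
      = d0.getD e [] ++ List.replicate (xs.count e) jv := by
  intro xs
  induction xs with
  | nil => intro d0 e; simp
  | cons x xs ih =>
      intro d0 e
      simp only [List.foldl_cons]
      rw [ih]
      rw [PySem.Dict.getD_modify]
      by_cases hx : e = x
      · subst hx
        simp only [List.count_cons, BEq.rfl, if_true, List.append_assoc]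
        rw [List.replicate_succ]
        simp
      · simp [hx, List.count_cons, Ne.symm hx]

theorem pv_index_getD (e : Int) : ∀ (ds : List (List Int)) (s : Int) (d0 : PySem.Dict Int (List Int)),
    ((PySem.List.enumerate ds s).foldl (fun d q => q.2.foldl (fun d x => d.modify x [] (fun l => l ++ [q.1])) d) d0).getD e []
      = d0.getD e [] ++ (PySem.List.enumerate ds s).flatMap (fun q => List.replicate (q.2.count e) q.1) := by
  intro ds
  induction ds with
  | nil => intro s d0; simp [PySem.List.enumerate_nil]
  | cons d ds ih =>
      intro s d0
      rw [PySem.List.enumerate_cons]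
      simp only [List.foldl_cons, List.flatMap_cons]
      rw [ih (s + 1), pv_modify_row]
      simp [List.append_assoc]

theorem pv_flat_count_lt (e : Int) : ∀ (ds : List (List Int)) (s v : Int), v < s →
    ((PySem.List.enumerate ds s).flatMap (fun q => List.replicate (q.2.count e) q.1)).count v = 0 := by
  intro ds
  induction ds with
  | nil => intro s v _; simp [PySem.List.enumerate_nil]
  | cons d ds ih =>
      intro s v hv
      rw [PySem.List.enumerate_cons]
      simp only [List.flatMap_cons, List.count_append]
      rw [ih (s + 1) v (by omega)]
      simp [List.count_replicate, (show ¬ (s = v) by omega)]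

theorem pv_flat_count (e : Int) : ∀ (ds : List (List Int)) (s : Int) (jN : Nat), jN < ds.length →
    ((PySem.List.enumerate ds s).flatMap (fun q => List.replicate (q.2.count e) q.1)).count (s + (jN : Int))
      = (ds.getD jN []).count e := by
  intro ds
  induction ds with
  | nil => intro s jN h; simp at h
  | cons d ds ih =>
      intro s jN h
      rw [PySem.List.enumerate_cons]
      simp only [List.flatMap_cons, List.count_append]
      cases jN with
      | zero =>
          rw [pv_flat_count_lt e ds (s + 1) (s + (0 : Nat)) (by omega)]
          simp [List.count_replicate]
      | succ k =>
          have hcast : s + ((k + 1 : Nat) : Int) = (s + 1) + (k : Int) := by push_cast; ring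
          rw [hcast, ih (s + 1) k (by simpa using h)]
          have : ¬ (s = (s + 1) + (k : Int)) := by omega
          simp [List.count_replicate, this]

theorem pv_cnt_sum : ∀ (L : List Int) (g : Int → List Int) (c0 : PySem.Dict Int Int) (v : Int),
    (L.foldl (fun c e => (g e).foldl (fun c j => c.insert j (c.getD j 0 + 1)) c) c0).getD v 0
      = c0.getD v 0 + ((L.map (fun e => (((g e).count v : Nat) : Int))).sum) := by
  intro L
  induction L with
  | nil => intro g c0 v; simp
  | cons e L ih =>
      intro g c0 v
      simp only [List.foldl_cons, List.map_cons, List.sum_cons]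
      rw [ih, PySem.Dict.getD_foldl_insert_add_one]
      ring

-- cnt.get(j, 0) computed by B equals A's |set(b[i]) & set(b[j])|
theorem pv_cnt_eq (b : List (List Int)) (iN jN : Nat) (hi : iN < b.length) (hj : jN < b.length) :
    (((PySem.List.pyGetD (b.map (fun s => PySem.List.dedup s)) ((iN : Nat) : Int) []).foldl (fun c e =>
      (((PySem.List.enumerate (b.map (fun s => PySem.List.dedup s))).foldl (fun d q =>
          q.2.foldl (fun d e => d.modify e [] (fun l => l ++ [q.1])) d) PySem.Dict.empty).getD e []).foldl
        (fun c j => c.insert j (c.getD j 0 + 1)) c) PySem.Dict.empty).getD ((jN : Nat) : Int) 0)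
      = pvW (pvBsets b) ((iN : Nat) : Int) ((jN : Nat) : Int) := by
  rw [pv_cnt_sum, PySem.Dict.getD_empty, zero_add]
  have hdsj : (b.map (fun s => PySem.List.dedup s)).getD jN [] = PySem.List.dedup (b[jN]) := by
    rw [List.getD_eq_getElem _ _ (by simpa using hj)]
    simp
  have hdsi : PySem.List.pyGetD (b.map (fun s => PySem.List.dedup s)) ((iN : Nat) : Int) [] = PySem.List.dedup (b[iN]) := by
    rw [PySem.List.pyGetD_natCast, List.getD_eq_getElem _ _ (by simpa using hi)]
    simp
  have hgetj : ∀ e : Int,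
      ((((PySem.List.enumerate (b.map (fun s => PySem.List.dedup s))).foldl (fun d q =>
          q.2.foldl (fun d e => d.modify e [] (fun l => l ++ [q.1])) d) PySem.Dict.empty).getD e []).count ((jN : Nat) : Int))
        = ((b.map (fun s => PySem.List.dedup s)).getD jN []).count e := by
    intro e
    rw [pv_index_getD]
    rw [PySem.Dict.getD_empty, List.nil_append]
    have h := pv_flat_count e (b.map (fun s => PySem.List.dedup s)) 0 jN (by simpa using hj)
    simpa using h
  have hfun : ∀ e ∈ PySem.List.pyGetD (b.map (fun s => PySem.List.dedup s)) ((iN : Nat) : Int) [],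
      (((((PySem.List.enumerate (b.map (fun s => PySem.List.dedup s))).foldl (fun d q =>
          q.2.foldl (fun d e => d.modify e [] (fun l => l ++ [q.1])) d) PySem.Dict.empty).getD e []).count ((jN : Nat) : Int) : Nat) : Int)
        = if (PySem.List.dedup (b[jN])).contains e = true then 1 else 0 := by
    intro e _
    rw [hgetj e, hdsj]
    by_cases hmem : e ∈ PySem.List.dedup (b[jN])
    · rw [List.count_eq_one_of_mem (PySem.List.nodup_dedup _) hmem]
      rw [PySem.List.mem_dedup] at hmem
      simp [hmem]
    · rw [List.count_eq_zero.mpr hmem]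
      rw [PySem.List.mem_dedup] at hmem
      simp [hmem]
  rw [List.map_congr_left hfun, PySem.List.sum_map_ite_one_zero]
  have hW : pvW (pvBsets b) ((iN : Nat) : Int) ((jN : Nat) : Int)
      = (((PySem.Set.ofList (b[iN])).filter (fun x => (PySem.Set.ofList (b[jN])).contains x)).length : Int) := by
    unfold pvW pvBsets
    rw [PySem.List.pyGetD_natCast, PySem.List.pyGetD_natCast,
        List.getD_eq_getElem _ _ (by simpa using hi), List.getD_eq_getElem _ _ (by simpa using hj)]
    simp [PySem.Set.inter]
  rw [hW, hdsi]
  rw [List.countP_eq_length_filter]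
  simp only [PySem.List.dedup_eq_ofList]
  rfl

-- B's per-batch row equals the abstract row with A's weights
set_option maxHeartbeats 4000000 in
theorem pv_rowB_eq (b : List (List Int)) :
    (PySem.List.pyRange 0 (b.length : Int) 1).foldl (fun row i =>
      row ++ [((PySem.List.pyRange 0 (b.length : Int) 1).foldl (fun st j =>
        if j ≠ i ∧ ((PySem.List.pyGetD (b.map (fun s => PySem.List.dedup s)) i []).foldl (fun c e =>
      (((PySem.List.enumerate (b.map (fun s => PySem.List.dedup s))).foldl (fun d q =>
          q.2.foldl (fun d e => d.modify e [] (fun l => l ++ [q.1])) d) PySem.Dict.empty).getD e []).foldl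
        (fun c j => c.insert j (c.getD j 0 + 1)) c) PySem.Dict.empty).getD j 0 > st.1 then (((PySem.List.pyGetD (b.map (fun s => PySem.List.dedup s)) i []).foldl (fun c e =>
      (((PySem.List.enumerate (b.map (fun s => PySem.List.dedup s))).foldl (fun d q =>
          q.2.foldl (fun d e => d.modify e [] (fun l => l ++ [q.1])) d) PySem.Dict.empty).getD e []).foldl
        (fun c j => c.insert j (c.getD j 0 + 1)) c) PySem.Dict.empty).getD j 0, j) else st) ((0 : Int), i)).2]) []
    = pvRow b := by
  have hm := PySem.List.foldl_append_singleton_eq_map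
    (fun i => ((PySem.List.pyRange 0 (b.length : Int) 1).foldl (fun st j =>
        if j ≠ i ∧ ((PySem.List.pyGetD (b.map (fun s => PySem.List.dedup s)) i []).foldl (fun c e =>
      (((PySem.List.enumerate (b.map (fun s => PySem.List.dedup s))).foldl (fun d q =>
          q.2.foldl (fun d e => d.modify e [] (fun l => l ++ [q.1])) d) PySem.Dict.empty).getD e []).foldl
        (fun c j => c.insert j (c.getD j 0 + 1)) c) PySem.Dict.empty).getD j 0 > st.1 then (((PySem.List.pyGetD (b.map (fun s => PySem.List.dedup s)) i []).foldl (fun c e =>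
      (((PySem.List.enumerate (b.map (fun s => PySem.List.dedup s))).foldl (fun d q =>
          q.2.foldl (fun d e => d.modify e [] (fun l => l ++ [q.1])) d) PySem.Dict.empty).getD e []).foldl
        (fun c j => c.insert j (c.getD j 0 + 1)) c) PySem.Dict.empty).getD j 0, j) else st) ((0 : Int), i)).2)
    (PySem.List.pyRange 0 (b.length : Int) 1) ([] : List Int)
  beta_reduce at hm
  rw [hm, List.nil_append]
  unfold pvRow
  apply List.map_congr_left
  intro i hi0
  rw [PySem.List.mem_pyRange_one] at hi0
  have hiI : i = ((i.toNat : Nat) : Int) := (Int.toNat_of_nonneg hi0.1).symm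
  have hiN : i.toNat < b.length := by omega
  rw [hiI]
  have hfold := PySem.List.foldl_congr_mem (PySem.List.pyRange 0 (b.length : Int) 1)
    (fun (st : Int × Int) j => if j ≠ ((i.toNat : Nat) : Int) ∧ ((PySem.List.pyGetD (b.map (fun s => PySem.List.dedup s)) (((i.toNat) : Nat) : Int) []).foldl (fun c e =>
      (((PySem.List.enumerate (b.map (fun s => PySem.List.dedup s))).foldl (fun d q =>
          q.2.foldl (fun d e => d.modify e [] (fun l => l ++ [q.1])) d) PySem.Dict.empty).getD e []).foldl
        (fun c j => c.insert j (c.getD j 0 + 1)) c) PySem.Dict.empty).getD j 0 > st.1 then (((PySem.List.pyGetD (b.map (fun s => PySem.List.dedup s)) (((i.toNat) : Nat) : Int) []).foldl (fun c e =>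
      (((PySem.List.enumerate (b.map (fun s => PySem.List.dedup s))).foldl (fun d q =>
          q.2.foldl (fun d e => d.modify e [] (fun l => l ++ [q.1])) d) PySem.Dict.empty).getD e []).foldl
        (fun c j => c.insert j (c.getD j 0 + 1)) c) PySem.Dict.empty).getD j 0, j) else st)
    (fun (st : Int × Int) j => if j ≠ ((i.toNat : Nat) : Int) ∧ pvW (pvBsets b) ((i.toNat : Nat) : Int) j > st.1 then (pvW (pvBsets b) ((i.toNat : Nat) : Int) j, j) else st)
    ((0 : Int), ((i.toNat : Nat) : Int)) ?_
  · rw [hfold]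
    rfl
  · intro acc j hjmem
    rw [PySem.List.mem_pyRange_one] at hjmem
    have hjI : j = ((j.toNat : Nat) : Int) := (Int.toNat_of_nonneg hjmem.1).symm
    have hjN : j.toNat < b.length := by omega
    rw [hjI]
    beta_reduce
    rw [pv_cnt_eq b i.toNat j.toNat hiN hjN]

-- B's outer loop appends one processed row per batch
set_option maxHeartbeats 4000000 in
theorem pvB_fold (st : List (List (List Int))) : ∀ acc : List (List Int),
    st.foldl (fun result sym_batch =>
      if sym_batch.length ≤ 2 then result ++ [PySem.List.pyRange 0 (sym_batch.length : Int) 1]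
      else if (PySem.List.pyGetD sym_batch 0 []).length ≤ 2 then result ++ [PySem.List.pyRange 0 (sym_batch.length : Int) 1]
      else
        let ds := sym_batch.map (fun s => PySem.List.dedup s)
        let index := (PySem.List.enumerate ds).foldl (fun d q =>
          q.2.foldl (fun d e => d.modify e [] (fun l => l ++ [q.1])) d) PySem.Dict.empty
        let row := (PySem.List.pyRange 0 (sym_batch.length : Int) 1).foldl (fun row i =>
          let cnt := (PySem.List.pyGetD ds i []).foldl (fun c e =>
            (index.getD e []).foldl (fun c j => c.insert j (c.getD j 0 + 1)) c) PySem.Dict.empty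
          row ++ [((PySem.List.pyRange 0 (sym_batch.length : Int) 1).foldl (fun st j =>
            let c := cnt.getD j 0
            if j ≠ i ∧ c > st.1 then (c, j) else st) ((0 : Int), i)).2]) []
        result ++ [row]) acc
    = acc ++ st.map pvPer := by
  induction st with
  | nil => intro acc; simp
  | cons b st ih =>
      intro acc
      simp only [List.foldl_cons, List.map_cons]
      by_cases h1 : b.length ≤ 2
      · simp only [if_pos h1]
        rw [ih (acc ++ [PySem.List.pyRange 0 (b.length : Int) 1])]
        simp [pvPer, pvInit, h1]
      · by_cases h2 : (PySem.List.pyGetD b 0 []).length ≤ 2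
        · simp only [if_neg h1, if_pos h2]
          rw [ih (acc ++ [PySem.List.pyRange 0 (b.length : Int) 1])]
          simp [pvPer, pvInit, h1, h2]
        · simp only [if_neg h1, if_neg h2]
          rw [pv_rowB_eq b]
          rw [ih (acc ++ [pvRow b])]
          simp [pvPer, h1, h2]

theorem find_similae_set_by_ja_B_eq (st : List (List (List Int))) :
    find_similae_set_by_ja_alt st = st.map pvPer := by
  unfold find_similae_set_by_ja_alt
  rw [pvB_fold st []]
  simp

-- ===== VERDICT (by name: the statement is the Claim_ definition above) =====
theorem find_similae_set_by_ja_spec : Claim_equal_find_similae_set_by_ja := by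
  intro st _
  unfold Spec_find_similae_set_by_ja
  rw [find_similae_set_by_ja_A_eq, find_similae_set_by_ja_B_eq]
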